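-- pv_equiv track=rewrite | github.com/surajit-patar/SIH-2023 | Tracker.py | detect_garbage
-- ===== SOURCE A (Python) =====
-- def detect_garbage(bboxes, confidences, class_ids):
--     person_id = 0
--     garbage_ids = [39,40,41,44,45,46,47,48,49,50,51,52,53,54,55,80]
--
--     person_bboxes = [bboxes[i] for i, class_id in enumerate(class_ids) if class_id == person_id]
--     garbage_bboxes = [bboxes[i] for i, class_id in enumerate(class_ids) if class_id in garbage_ids]
--
--     garbage = []
--
--     for garbage_bbox in garbage_bboxes:
--         is_present = True
--         for person_bbox in person_bboxes:
--             if intersects(garbage_bbox, person_bbox):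
--                 is_present = False
--                 break
--         if is_present:
--             garbage.append(garbage_bbox)
--
--     # Calculate the area of garbage bounding boxes
--     garbage_areas = [(bbox[2] - bbox[0]) * (bbox[3] - bbox[1]) for bbox in garbage]
--
--     return garbage, garbage_areas
--
-- def intersects(bbox1, bbox2):
--
--     x1, y1, w1, h1 = bbox1
--     x2, y2, w2, h2 = bbox2
--
--     if (x1 < x2 + w2 and x1 + w1 > x2 and y1 < y2 + h2 and y1 + h1 > y2):
--         return True
--     return False
-- ===== SOURCE B (Python) =====
-- def _overlaps(g, p):
--     return (g[0] < p[0] + p[2] and g[0] + g[2] > p[0]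
--             and g[1] < p[1] + p[3] and g[1] + g[3] > p[1])
--
-- def detect_garbage(bboxes, confidences, class_ids):
--     person_id = 0
--     garbage_ids = {39, 40, 41, 44, 45, 46, 47, 48, 49, 50, 51, 52, 53, 54, 55, 80}
--     persons = [b for b, c in zip(bboxes, class_ids) if c == person_id]
--     garbage = [b for b, c in zip(bboxes, class_ids) if c in garbage_ids]
--     # inverted nesting: successively prune the surviving garbage boxes per person box
--     for p in persons:
--         garbage = [g for g in garbage if not _overlaps(g, p)]
--     areas = [(g[2] - g[0]) * (g[3] - g[1]) for g in garbage]
--     return garbage, areas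
-- ===== Notes on version B (the rewrite author's own statement) =====
-- stated objective: alternative
-- what changed: A scans every person box per garbage box with a flag/break inside a nested loop over index-based comprehensions; B selects persons and garbage in a single zip pass (set membership for the garbage ids) and inverts the loop nesting, successively pruning the shrinking survivor list once per person box (order-independence of the filters is proved).
import Mathlib
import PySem

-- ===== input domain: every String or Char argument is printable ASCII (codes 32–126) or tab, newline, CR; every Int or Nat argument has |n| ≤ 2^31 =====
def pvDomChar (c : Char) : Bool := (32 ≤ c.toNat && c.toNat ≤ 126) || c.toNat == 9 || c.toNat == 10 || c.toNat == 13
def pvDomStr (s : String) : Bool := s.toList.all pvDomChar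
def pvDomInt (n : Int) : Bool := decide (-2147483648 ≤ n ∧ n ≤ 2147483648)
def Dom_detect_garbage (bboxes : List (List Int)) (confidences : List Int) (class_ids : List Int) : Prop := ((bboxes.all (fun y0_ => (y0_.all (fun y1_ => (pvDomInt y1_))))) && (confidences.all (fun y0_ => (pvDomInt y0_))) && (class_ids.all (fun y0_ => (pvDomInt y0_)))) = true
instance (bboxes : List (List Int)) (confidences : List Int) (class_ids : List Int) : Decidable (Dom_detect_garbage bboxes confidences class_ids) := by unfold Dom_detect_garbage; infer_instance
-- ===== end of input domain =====

-- B inverts the loop nesting: one zip pass selects persons/garbage, then the surviving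
-- garbage list is pruned once per person box (alternative decomposition, same cost).


-- ===== PORT A =====
-- list element access b[i]; Pre_ guarantees the boxes consulted have exactly 4 coordinates
def pvNth (l : List Int) (i : Nat) : Int := l.getD i 0

def garbageIdsA : List Int := [39, 40, 41, 44, 45, 46, 47, 48, 49, 50, 51, 52, 53, 54, 55, 80]

-- A's intersects: unpacks (x,y,w,h) from both boxes and tests the four strict inequalities
def intersectsA (b1 b2 : List Int) : Bool :=
  let x1 := pvNth b1 0; let y1 := pvNth b1 1; let w1 := pvNth b1 2; let h1 := pvNth b1 3
  let x2 := pvNth b2 0; let y2 := pvNth b2 1; let w2 := pvNth b2 2; let h2 := pvNth b2 3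
  decide (x1 < x2 + w2 ∧ x1 + w1 > x2 ∧ y1 < y2 + h2 ∧ y1 + h1 > y2)

-- A's '[bboxes[i] for i, class_id in enumerate(class_ids) if pred(class_id)]'
def selA (bboxes : List (List Int)) (pred : Int → Bool) : List Int → Nat → List (List Int)
  | [], _ => []
  | c :: cs, i =>
      if pred c then bboxes.getD i [] :: selA bboxes pred cs (i + 1)
      else selA bboxes pred cs (i + 1)

-- A's inner loop: is_present flag, break on first intersecting person box
def presentA (g : List Int) : List (List Int) → Bool
  | [] => true
  | p :: ps => if intersectsA g p then false else presentA g ps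

def detect_garbage (bboxes : List (List Int)) (confidences : List Int) (class_ids : List Int) : List (List Int) × List Int :=
  let person_bboxes := selA bboxes (fun c => c == 0) class_ids 0
  let garbage_bboxes := selA bboxes (fun c => garbageIdsA.contains c) class_ids 0
  let garbage := garbage_bboxes.filter (fun g => presentA g person_bboxes)
  (garbage, garbage.map (fun b => (pvNth b 2 - pvNth b 0) * (pvNth b 3 - pvNth b 1)))

-- ===== PORT B =====
def garbageIdsB : List Int := [39, 40, 41, 44, 45, 46, 47, 48, 49, 50, 51, 52, 53, 54, 55, 80]

def overlapsB (g p : List Int) : Bool :=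
  decide (g.getD 0 0 < p.getD 0 0 + p.getD 2 0 ∧ g.getD 0 0 + g.getD 2 0 > p.getD 0 0
        ∧ g.getD 1 0 < p.getD 1 0 + p.getD 3 0 ∧ g.getD 1 0 + g.getD 3 0 > p.getD 1 0)

def detect_garbage_alt (bboxes : List (List Int)) (confidences : List Int) (class_ids : List Int) : List (List Int) × List Int :=
  let pairs := List.zip bboxes class_ids
  let persons := (pairs.filter (fun bc => bc.2 == 0)).map Prod.fst
  let garbage0 := (pairs.filter (fun bc => garbageIdsB.contains bc.2)).map Prod.fst
  let survivors := persons.foldl (fun gs p => gs.filter (fun g => !overlapsB g p)) garbage0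
  (survivors, survivors.map (fun g => (g.getD 2 0 - g.getD 0 0) * (g.getD 3 0 - g.getD 1 0)))

-- ===== PRECONDITION & SPEC =====
-- Pre_ excludes inputs where a selected person/garbage class_id has no bbox at its index
-- (A always raises IndexError) or a consulted box has the wrong number of coordinates
-- (garbage boxes need indices 0-3; any box unpacked by intersects needs exactly 4): there A
-- raises ValueError/IndexError except in rare value-dependent corners (an early break skips
-- a malformed person box) where it still returns; B returns the same value there (see cite).
def Pre_detect_garbage (bboxes : List (List Int)) (confidences : List Int) (class_ids : List Int) : Prop :=
  (∀ i < class_ids.length,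
     class_ids.getD i 1 ∈ ([0, 39, 40, 41, 44, 45, 46, 47, 48, 49, 50, 51, 52, 53, 54, 55, 80] : List Int) →
     i < bboxes.length)
  ∧ ((class_ids.any (fun c => ([39, 40, 41, 44, 45, 46, 47, 48, 49, 50, 51, 52, 53, 54, 55, 80] : List Int).contains c)) = true →
     ∀ i < class_ids.length, class_ids.getD i 1 = 0 → (bboxes.getD i []).length = 4)
  ∧ (∀ i < class_ids.length,
     class_ids.getD i 1 ∈ ([39, 40, 41, 44, 45, 46, 47, 48, 49, 50, 51, 52, 53, 54, 55, 80] : List Int) →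
     (class_ids.contains (0 : Int) = true → (bboxes.getD i []).length = 4)
     ∧ (class_ids.contains (0 : Int) = false → 4 ≤ (bboxes.getD i []).length))
instance (bboxes : List (List Int)) (confidences : List Int) (class_ids : List Int) : Decidable (Pre_detect_garbage bboxes confidences class_ids) := by unfold Pre_detect_garbage; infer_instance

def pvWitness_detect_garbage : List (List Int) × List Int × List Int :=
  ([[0, 0, 2, 2], [1, 1, 3, 3], [10, 10, 2, 2]], [90, 80, 70], [0, 39, 44])

def Spec_detect_garbage (bboxes : List (List Int)) (confidences : List Int) (class_ids : List Int) (out : List (List Int) × List Int) : Prop := out = detect_garbage_alt bboxes confidences class_ids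
instance (bboxes : List (List Int)) (confidences : List Int) (class_ids : List Int) (out : List (List Int) × List Int) : Decidable (Spec_detect_garbage bboxes confidences class_ids out) := by unfold Spec_detect_garbage; infer_instance

-- ===== CLAIM (what is proved, stated in full; the proofs are below) =====
def Claim_equal_detect_garbage : Prop := ∀ (bboxes : List (List Int)) (confidences : List Int) (class_ids : List Int), Dom_detect_garbage bboxes confidences class_ids → Pre_detect_garbage bboxes confidences class_ids → Spec_detect_garbage bboxes confidences class_ids (detect_garbage bboxes confidences class_ids)

-- ===== LEMMAS AND PROOFS =====
theorem sel_eq (pred : Int → Bool) :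
    ∀ (cs : List Int) (bboxes : List (List Int)) (i : Nat),
      (∀ j < cs.length, pred (cs.getD j 1) = true → i + j < bboxes.length) →
      selA bboxes pred cs i
        = (((bboxes.drop i).zip cs).filter (fun bc => pred bc.2)).map Prod.fst := by
  intro cs
  induction cs with
  | nil => intro bboxes i h; simp [selA]
  | cons c cs ih =>
    intro bboxes i h
    have hshift : ∀ j < cs.length, pred (cs.getD j 1) = true → (i + 1) + j < bboxes.length := by
      intro j hj hp
      have := h (j + 1) (by simpa using Nat.succ_lt_succ hj) (by simpa using hp)
      omega
    by_cases hp : pred c = true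
    · have hi : i < bboxes.length := by
        have := h 0 (by simp) (by simpa using hp)
        omega
      have hdrop : bboxes.drop i = bboxes[i] :: bboxes.drop (i + 1) := by
        exact List.drop_eq_getElem_cons hi
      have hget : bboxes.getD i [] = bboxes[i] := List.getD_eq_getElem bboxes [] hi
      rw [hdrop]
      simp only [List.zip_cons_cons, List.filter_cons, hp, selA]
      simp [ih bboxes (i + 1) hshift, List.getElem?_eq_getElem hi]
    · have hp' : pred c = false := by simpa using hp
      have hdrop1 : bboxes.drop (i + 1) = (bboxes.drop i).tail := by
        rw [← List.drop_drop]; simp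
      have hsel : selA bboxes pred (c :: cs) i = selA bboxes pred cs (i + 1) := by
        simp [selA, hp']
      cases hd : bboxes.drop i with
      | nil =>
        rw [hsel, ih bboxes (i + 1) hshift, hdrop1, hd]
        simp
      | cons b tl =>
        rw [hsel, ih bboxes (i + 1) hshift, hdrop1, hd]
        simp [hp']

theorem overlaps_eq (g p : List Int) : overlapsB g p = intersectsA g p := by
  simp [overlapsB, intersectsA, pvNth]

theorem foldl_filter_eq :
    ∀ (persons : List (List Int)) (gs : List (List Int)),
      persons.foldl (fun gs p => gs.filter (fun g => !overlapsB g p)) gs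
        = gs.filter (fun g => presentA g persons) := by
  intro persons
  induction persons with
  | nil => intro gs; simp [presentA]
  | cons p ps ih =>
    intro gs
    simp only [List.foldl_cons, ih, List.filter_filter]
    apply List.filter_congr
    intro g _
    simp [presentA, overlaps_eq]
    by_cases h : intersectsA g p = true <;> simp [h]

-- ===== VERDICT (by name: the statement is the Claim_ definition above) =====
theorem detect_garbage_spec : Claim_equal_detect_garbage := by
  intro bboxes confidences class_ids _ hpre
  unfold Spec_detect_garbage detect_garbage detect_garbage_alt
  have hP : ∀ j < class_ids.length, ((class_ids.getD j 1 : Int) == 0) = true → 0 + j < bboxes.length := by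
    intro j hj hp
    have := hpre.1 j hj (by simp at hp; simp [hp])
    omega
  have hG : ∀ j < class_ids.length, (garbageIdsA.contains (class_ids.getD j 1)) = true → 0 + j < bboxes.length := by
    intro j hj hp
    have hm : class_ids.getD j 1 ∈ ([0, 39, 40, 41, 44, 45, 46, 47, 48, 49, 50, 51, 52, 53, 54, 55, 80] : List Int) := by
      have := List.mem_of_elem_eq_true hp
      simp [garbageIdsA] at this
      simp; tauto
    have := hpre.1 j hj hm
    omega
  rw [sel_eq _ class_ids bboxes 0 hP, sel_eq _ class_ids bboxes 0 hG]
  simp only [List.drop_zero]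
  rw [foldl_filter_eq]
  simp [pvNth, garbageIdsA, garbageIdsB]
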